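-- pv_equiv track=rewrite | github.com/Kamend1/SoftUni-Courses | softuni_python_advanced/week_8_workshops/connect_four_game.py | explore_if_four_connected
-- ===== SOURCE A (Python) =====
-- import copy
--
-- directions = {
--     'up': (-1, 0),
--     'left': (0, -1),
--     'upleft': (-1, -1),
--     'upright': (-1, 1)
-- }
--
-- def search_direction(matrix, row_idx, col_idx, player_idx, direction):
--     current_matrix = copy.deepcopy(matrix)
--     result = 0
--
--     if row_idx < 0 or col_idx < 0 or row_idx >= len(current_matrix) or col_idx >= len(current_matrix[0]):
--         return 0
--     if current_matrix[row_idx][col_idx] != player_idx: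
--         return 0
--
--     current_matrix[row_idx][col_idx] = 'v'
--     result += 1
--     if result == 4:
--         return result
--
--     coords = directions[direction]
--
--     result += search_direction(current_matrix, row_idx + coords[0], col_idx + coords[1], player_idx, direction)
--     result += search_direction(current_matrix, row_idx - coords[0], col_idx - coords[1], player_idx, direction)
--
--     return result
--
-- def explore_if_four_connected(matrix, row_idx, column_idx, player_idx):
--     player_won = False
--     max_score = 0
--     for direction in directions.keys():
--         max_score = 0
--         current_result = search_direction(matrix, row_idx, column_idx, player_idx, direction)
--         if current_result > max_score:
--             max_score = current_result
--         if max_score >= 4: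
--             player_won = True
--
--     return player_won
-- ===== SOURCE B (Python) =====
-- def explore_if_four_connected(matrix, row_idx, column_idx, player_idx):
--     rows = len(matrix)
--     cols = len(matrix[0]) if matrix else 0
--     if not (0 <= row_idx < rows and 0 <= column_idx < cols):
--         return False
--     if matrix[row_idx][column_idx] != player_idx:
--         return False
--     for dr, dc in ((-1, 0), (0, -1), (-1, -1), (-1, 1)):
--         count = 1
--         for s in (1, -1):
--             r, c = row_idx + s * dr, column_idx + s * dc
--             while 0 <= r < rows and 0 <= c < cols and matrix[r][c] == player_idx:
--                 count += 1
--                 r += s * dr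
--                 c += s * dc
--         if count >= 4:
--             return True
--     return False
-- ===== Notes on version B (the rewrite author's own statement) =====
-- stated objective: faster
-- what changed: Replaces A's recursive search that deep-copies and marks the whole matrix at every visited cell with an in-place two-way pointer walk that counts consecutive matching cells along each of the four axes.
-- outside the precondition, e.g. on explore_if_four_connected([['x'], ['y', 'z']], 0, 0, 'x'): A returns False, B returns False; on explore_if_four_connected([['v', 'a']], 0, 0, 'v'): A returns False, B returns False
import Mathlib
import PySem

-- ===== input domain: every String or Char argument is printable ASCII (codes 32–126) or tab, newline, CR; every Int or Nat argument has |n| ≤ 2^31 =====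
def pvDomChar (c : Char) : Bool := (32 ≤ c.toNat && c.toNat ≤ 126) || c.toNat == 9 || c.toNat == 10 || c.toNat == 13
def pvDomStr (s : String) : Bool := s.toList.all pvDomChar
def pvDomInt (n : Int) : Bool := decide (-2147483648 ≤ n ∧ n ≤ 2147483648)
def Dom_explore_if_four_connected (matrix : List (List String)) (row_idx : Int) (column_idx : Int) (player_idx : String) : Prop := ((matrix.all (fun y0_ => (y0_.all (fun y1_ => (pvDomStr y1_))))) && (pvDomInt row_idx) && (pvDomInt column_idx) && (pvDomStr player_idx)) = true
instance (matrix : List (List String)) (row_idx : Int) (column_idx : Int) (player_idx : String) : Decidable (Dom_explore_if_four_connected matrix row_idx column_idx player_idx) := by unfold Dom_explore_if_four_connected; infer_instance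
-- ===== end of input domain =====

-- B replaces A's recursive search (which deep-copies and marks the matrix at every visited
-- cell) with a two-way pointer walk counting consecutive matching cells along each axis,
-- intended to avoid the per-cell deepcopy cost.

-- ===== PORT A =====

-- matrix[r][c] (both indices already guarded nonnegative and in range by A's code)
def pvCell (m : List (List String)) (r c : Int) : Option String :=
  (PySem.List.pyGet? m r).bind (fun row => PySem.List.pyGet? row c)

-- current_matrix[row_idx][col_idx] = 'v'
def pvSetCell (m : List (List String)) (r c : Int) (v : String) : List (List String) :=
  m.modify r.toNat (fun row => row.set c.toNat v)

-- the module-level 'directions' dict: lookup by key (all four keys are present)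
def dirCoordsA (k : String) : Int × Int :=
  if k = "up" then (-1, 0)
  else if k = "left" then (0, -1)
  else if k = "upleft" then (-1, -1)
  else (-1, 1)

-- search_direction, with a fuel guard making the Python recursion total (fuel is generous
-- enough on every input where the Python returns; it only caps the diverging cases)
def searchDirectionA (fuel : Nat) (m : List (List String)) (row_idx col_idx : Int)
    (player_idx : String) (coords : Int × Int) : Int :=
  match fuel with
  | 0 => 0
  | fuel + 1 =>
    -- current_matrix = copy.deepcopy(matrix): pure values, identity
    if row_idx < 0 ∨ col_idx < 0 ∨ (m.length : Int) ≤ row_idx ∨ ((m.headD []).length : Int) ≤ col_idx then 0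
    else if pvCell m row_idx col_idx ≠ some player_idx then 0
    else
      let m' := pvSetCell m row_idx col_idx "v"
      let result : Int := 1
      if result = 4 then result
      else
        result
          + searchDirectionA fuel m' (row_idx + coords.1) (col_idx + coords.2) player_idx coords
          + searchDirectionA fuel m' (row_idx - coords.1) (col_idx - coords.2) player_idx coords

def explore_if_four_connected (matrix : List (List String)) (row_idx : Int) (column_idx : Int) (player_idx : String) : Bool :=
  let fuel := matrix.length + (matrix.headD []).length + 5
  (["up", "left", "upleft", "upright"].foldl
    (fun (st : Bool × Int) (direction : String) =>
      let max_score : Int := 0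
      let current_result := searchDirectionA fuel matrix row_idx column_idx player_idx (dirCoordsA direction)
      let max_score := if max_score < current_result then current_result else max_score
      let player_won := if 4 ≤ max_score then true else st.1
      (player_won, max_score))
    (false, 0)).1

-- ===== PORT B =====

-- the while loop of B: count consecutive matching cells from (r,c) stepping by (dr,dc)
def walkB (fuel : Nat) (m : List (List String)) (rows cols : Int) (r c dr dc : Int)
    (player : String) : Int :=
  match fuel with
  | 0 => 0
  | fuel + 1 =>
    if 0 ≤ r ∧ r < rows ∧ 0 ≤ c ∧ c < cols ∧ pvCell m r c = some player then
      1 + walkB fuel m rows cols (r + dr) (c + dc) dr dc player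
    else 0

def explore_if_four_connected_alt (matrix : List (List String)) (row_idx : Int) (column_idx : Int) (player_idx : String) : Bool :=
  let rows : Int := matrix.length
  let cols : Int := (matrix.headD []).length
  if ¬ (0 ≤ row_idx ∧ row_idx < rows ∧ 0 ≤ column_idx ∧ column_idx < cols) then false
  else if pvCell matrix row_idx column_idx ≠ some player_idx then false
  else
    let fuel := matrix.length + (matrix.headD []).length + 4
    [((-1 : Int), (0 : Int)), (0, -1), (-1, -1), (-1, 1)].any (fun d =>
      -- the s ∈ (1, -1) loop, unrolled: one arm forward, one arm backward
      let count : Int := 1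
          + walkB fuel matrix rows cols (row_idx + d.1) (column_idx + d.2) d.1 d.2 player_idx
          + walkB fuel matrix rows cols (row_idx - d.1) (column_idx - d.2) (-d.1) (-d.2) player_idx
      decide (4 ≤ count))

-- ===== PRECONDITION & SPEC =====
-- Pre_ excludes inputs where Python A raises: ragged matrices can hit IndexError and the
-- token "v" can make A's 'v'-marked cells re-match and recurse forever (RecursionError);
-- both are impossible when the start cell is out of bounds or does not match, so those
-- inputs stay admitted whatever the matrix shape or token.
def Pre_explore_if_four_connected (matrix : List (List String)) (row_idx : Int) (column_idx : Int) (player_idx : String) : Prop :=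
  (row_idx < 0 ∨ column_idx < 0 ∨ (matrix.length : Int) ≤ row_idx ∨ ((matrix.headD []).length : Int) ≤ column_idx)
  ∨ ((pvCell matrix row_idx column_idx).isSome = true ∧ pvCell matrix row_idx column_idx ≠ some player_idx)
  ∨ ((∀ row ∈ matrix, row.length = (matrix.headD []).length) ∧ player_idx ≠ "v")
instance (matrix : List (List String)) (row_idx : Int) (column_idx : Int) (player_idx : String) : Decidable (Pre_explore_if_four_connected matrix row_idx column_idx player_idx) := by unfold Pre_explore_if_four_connected; infer_instance

def pvWitness_explore_if_four_connected : List (List String) × Int × Int × String :=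
  ([["a", "a"], ["a", "b"]], 1, 1, "a")

def Spec_explore_if_four_connected (matrix : List (List String)) (row_idx : Int) (column_idx : Int) (player_idx : String) (out : Bool) : Prop := out = explore_if_four_connected_alt matrix row_idx column_idx player_idx
instance (matrix : List (List String)) (row_idx : Int) (column_idx : Int) (player_idx : String) (out : Bool) : Decidable (Spec_explore_if_four_connected matrix row_idx column_idx player_idx out) := by unfold Spec_explore_if_four_connected; infer_instance

-- ===== CLAIM (what is proved, stated in full; the proofs are below) =====
def Claim_equal_explore_if_four_connected : Prop := ∀ (matrix : List (List String)) (row_idx : Int) (column_idx : Int) (player_idx : String), Dom_explore_if_four_connected matrix row_idx column_idx player_idx → Pre_explore_if_four_connected matrix row_idx column_idx player_idx → Spec_explore_if_four_connected matrix row_idx column_idx player_idx (explore_if_four_connected matrix row_idx column_idx player_idx)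

-- ===== LEMMAS AND PROOFS =====

-- a call whose guards fail returns 0, for any fuel
theorem searchA_zero (fuel : Nat) (m : List (List String)) (r c : Int) (p : String) (d : Int × Int)
    (h : (r < 0 ∨ c < 0 ∨ (m.length : Int) ≤ r ∨ ((m.headD []).length : Int) ≤ c) ∨ pvCell m r c ≠ some p) :
    searchDirectionA fuel m r c p d = 0 := by
  cases fuel with
  | zero => rfl
  | succ fuel =>
    unfold searchDirectionA
    rcases h with h | h
    · rw [if_pos h]
    · by_cases h1 : r < 0 ∨ c < 0 ∨ (m.length : Int) ≤ r ∨ ((m.headD []).length : Int) ≤ c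
      · rw [if_pos h1]
      · rw [if_neg h1, if_pos h]

-- setting one cell preserves the shape of the matrix
theorem length_pvSetCell (m : List (List String)) (r c : Int) (v : String) :
    (pvSetCell m r c v).length = m.length := by
  simp [pvSetCell]

theorem headD_length_pvSetCell (m : List (List String)) (r c : Int) (v : String) :
    ((pvSetCell m r c v).headD []).length = (m.headD []).length := by
  cases m with
  | nil => simp [pvSetCell]
  | cons row rest =>
    cases hr : r.toNat with
    | zero => simp [pvSetCell, List.modify, hr]
    | succ n => simp [pvSetCell, List.modify, hr]

-- reading a cell other than the one that was set is unchanged (all indices nonnegative)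
theorem pvCell_set_ne (m : List (List String)) (a b r c : Int) (v : String)
    (ha : 0 ≤ a) (hb : 0 ≤ b) (hr : 0 ≤ r) (hc : 0 ≤ c) (hne : ¬ (r = a ∧ c = b)) :
    pvCell (pvSetCell m a b v) r c = pvCell m r c := by
  have hne' : ¬ (a.toNat = r.toNat ∧ b.toNat = c.toNat) := by omega
  simp only [pvCell, pvSetCell, PySem.List.pyGet?_of_nonneg _ hr, PySem.List.pyGet?_of_nonneg _ hc]
  rw [List.getElem?_modify]
  cases h : m[r.toNat]? with
  | none => simp
  | some row =>
    by_cases har : a.toNat = r.toNat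
    · have hbc : ¬ b.toNat = c.toNat := fun hh => hne' ⟨har, hh⟩
      simp [har, List.getElem?_set, hbc]
    · simp [har]

-- reading back the cell that was set (the original read succeeded, so both indices are valid)
theorem pvCell_set_self (m : List (List String)) (r c : Int) (v x : String)
    (hr : 0 ≤ r) (hc : 0 ≤ c) (hcell : pvCell m r c = some x) :
    pvCell (pvSetCell m r c v) r c = some v := by
  simp only [pvCell, pvSetCell, PySem.List.pyGet?_of_nonneg _ hr, PySem.List.pyGet?_of_nonneg _ hc] at hcell ⊢
  rw [List.getElem?_modify]
  cases h : m[r.toNat]? with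
  | none => rw [h] at hcell; simp at hcell
  | some row =>
    rw [h] at hcell
    simp only [Option.bind_some] at hcell
    have hlt : c.toNat < row.length := by
      by_contra hge
      rw [List.getElem?_eq_none (by omega)] at hcell
      simp at hcell
    simp [List.getElem?_set, hlt]

-- one unfolding step of walkB
theorem walkB_succ (fuel : Nat) (m : List (List String)) (rows cols r c dr dc : Int) (p : String) :
    walkB (fuel + 1) m rows cols r c dr dc p
      = if 0 ≤ r ∧ r < rows ∧ 0 ≤ c ∧ c < cols ∧ pvCell m r c = some p then
          1 + walkB fuel m rows cols (r + dr) (c + dc) dr dc p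
        else 0 := rfl

-- walkB never revisits a strictly-behind cell, so a mark strictly behind is invisible
theorem walkB_set_behind (fuel : Nat) (m : List (List String)) (rows cols : Int)
    (r c dr dc : Int) (p v : String) (j : Nat) (a b : Int)
    (hj : 1 ≤ j) (ha : a = r - (j : Int) * dr) (hb : b = c - (j : Int) * dc)
    (ha0 : 0 ≤ a) (hb0 : 0 ≤ b) (hd : ¬ (dr = 0 ∧ dc = 0)) :
    walkB fuel (pvSetCell m a b v) rows cols r c dr dc p = walkB fuel m rows cols r c dr dc p := by
  induction fuel generalizing r c j with
  | zero => rfl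
  | succ fuel ih =>
    rw [walkB_succ, walkB_succ]
    by_cases hbound : 0 ≤ r ∧ r < rows ∧ 0 ≤ c ∧ c < cols
    · have hne : ¬ (r = a ∧ c = b) := by
        rintro ⟨h1, h2⟩
        have hj0 : (j : Int) ≠ 0 := by exact_mod_cast Nat.one_le_iff_ne_zero.mp hj
        have hdr : (j : Int) * dr = 0 := by linarith
        have hdc : (j : Int) * dc = 0 := by linarith
        exact hd ⟨(mul_eq_zero.mp hdr).resolve_left hj0, (mul_eq_zero.mp hdc).resolve_left hj0⟩
      have hcell := pvCell_set_ne m a b r c v ha0 hb0 hbound.1 hbound.2.2.1 hne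
      rw [hcell]
      by_cases hg : 0 ≤ r ∧ r < rows ∧ 0 ≤ c ∧ c < cols ∧ pvCell m r c = some p
      · rw [if_pos hg, if_pos hg]
        congr 1
        exact ih (r + dr) (c + dc) (j + 1) (by omega) (by push_cast; linarith) (by push_cast; linarith)
      · rw [if_neg hg, if_neg hg]
    · rw [if_neg (fun hg => hbound ⟨hg.1, hg.2.1, hg.2.2.1, hg.2.2.2.1⟩),
         if_neg (fun hg => hbound ⟨hg.1, hg.2.1, hg.2.2.1, hg.2.2.2.1⟩)]

-- A's recursion, entered with the cell one step backward dead, is the forward walk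
theorem searchA_eq_walk_fwd (fuel : Nat) (m : List (List String)) (r c dr dc : Int) (p : String)
    (hp : p ≠ "v") (hd : ¬ (dr = 0 ∧ dc = 0))
    (hback : (r - dr < 0 ∨ c - dc < 0 ∨ (m.length : Int) ≤ r - dr ∨ ((m.headD []).length : Int) ≤ c - dc) ∨ pvCell m (r - dr) (c - dc) ≠ some p) :
    searchDirectionA fuel m r c p (dr, dc) = walkB fuel m m.length (m.headD []).length r c dr dc p := by
  induction fuel generalizing m r c with
  | zero => rfl
  | succ fuel ih =>
    by_cases hin : r < 0 ∨ c < 0 ∨ (m.length : Int) ≤ r ∨ ((m.headD []).length : Int) ≤ c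
    · rw [searchA_zero _ _ _ _ _ _ (Or.inl hin)]
      rw [walkB_succ, if_neg (fun hg => by rcases hin with h | h | h | h <;> omega)]
    · push_neg at hin
      obtain ⟨h0r, h0c, hrl, hcl⟩ := hin
      by_cases hcell : pvCell m r c = some p
      · unfold searchDirectionA
        rw [if_neg (by push_neg; exact ⟨h0r, h0c, hrl, hcl⟩), if_neg (fun hh => hh hcell)]
        simp only []
        rw [if_neg (by norm_num)]
        set m' := pvSetCell m r c "v" with hm'
        have hlen : m'.length = m.length := length_pvSetCell m r c "v"
        have hhead : (m'.headD []).length = (m.headD []).length := headD_length_pvSetCell m r c "v"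
        -- the backward child is dead
        have hbz : searchDirectionA fuel m' (r - dr) (c - dc) p (dr, dc) = 0 := by
          by_cases hbb : r - dr < 0 ∨ c - dc < 0 ∨ (m.length : Int) ≤ r - dr ∨ ((m.headD []).length : Int) ≤ c - dc
          · exact searchA_zero _ _ _ _ _ _ (Or.inl (by rw [hlen, hhead]; exact hbb))
          · push_neg at hbb
            have hcb : pvCell m (r - dr) (c - dc) ≠ some p := by
              rcases hback with h | h
              · exact absurd h (by push_neg; exact hbb)
              · exact h
            have hne : ¬ (r - dr = r ∧ c - dc = c) := fun ⟨h1, h2⟩ => hd ⟨by omega, by omega⟩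
            have := pvCell_set_ne m r c (r - dr) (c - dc) "v" h0r h0c hbb.1 hbb.2.1 hne
            exact searchA_zero _ _ _ _ _ _ (Or.inr (by rw [this]; exact hcb))
        -- the forward child is the walk from one step ahead
        have hmark : pvCell m' r c = some "v" := pvCell_set_self m r c "v" p h0r h0c hcell
        have hfz : searchDirectionA fuel m' (r + dr) (c + dc) p (dr, dc)
            = walkB fuel m m.length (m.headD []).length (r + dr) (c + dc) dr dc p := by
          have hb' : pvCell m' (r + dr - dr) (c + dc - dc) ≠ some p := by
            have e1 : r + dr - dr = r := by ring
            have e2 : c + dc - dc = c := by ring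
            rw [e1, e2, hmark]
            intro hh
            exact hp (by injection hh with hh; exact hh.symm)
          have := ih m' (r + dr) (c + dc) (Or.inr hb')
          rw [this, hlen, hhead, hm']
          exact walkB_set_behind fuel m (m.length) ((m.headD []).length) (r + dr) (c + dc) dr dc p "v"
            1 r c (by omega) (by push_cast; ring) (by push_cast; ring) h0r h0c hd
        rw [hbz, hfz, walkB_succ, if_pos ⟨h0r, hrl, h0c, hcl, hcell⟩]
        ring
      · rw [searchA_zero _ _ _ _ _ _ (Or.inr hcell), walkB_succ,
           if_neg (fun hg => hcell hg.2.2.2.2)]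

-- mirror image: cell one step forward dead ⇒ the backward walk
theorem searchA_eq_walk_bwd (fuel : Nat) (m : List (List String)) (r c dr dc : Int) (p : String)
    (hp : p ≠ "v") (hd : ¬ (dr = 0 ∧ dc = 0))
    (hfwd : (r + dr < 0 ∨ c + dc < 0 ∨ (m.length : Int) ≤ r + dr ∨ ((m.headD []).length : Int) ≤ c + dc) ∨ pvCell m (r + dr) (c + dc) ≠ some p) :
    searchDirectionA fuel m r c p (dr, dc) = walkB fuel m m.length (m.headD []).length r c (-dr) (-dc) p := by
  induction fuel generalizing m r c with
  | zero => rfl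
  | succ fuel ih =>
    by_cases hin : r < 0 ∨ c < 0 ∨ (m.length : Int) ≤ r ∨ ((m.headD []).length : Int) ≤ c
    · rw [searchA_zero _ _ _ _ _ _ (Or.inl hin)]
      rw [walkB_succ, if_neg (fun hg => by rcases hin with h | h | h | h <;> omega)]
    · push_neg at hin
      obtain ⟨h0r, h0c, hrl, hcl⟩ := hin
      by_cases hcell : pvCell m r c = some p
      · unfold searchDirectionA
        rw [if_neg (by push_neg; exact ⟨h0r, h0c, hrl, hcl⟩), if_neg (fun hh => hh hcell)]
        simp only []
        rw [if_neg (by norm_num)]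
        set m' := pvSetCell m r c "v" with hm'
        have hlen : m'.length = m.length := length_pvSetCell m r c "v"
        have hhead : (m'.headD []).length = (m.headD []).length := headD_length_pvSetCell m r c "v"
        -- the forward child is dead
        have hfz : searchDirectionA fuel m' (r + dr) (c + dc) p (dr, dc) = 0 := by
          by_cases hbb : r + dr < 0 ∨ c + dc < 0 ∨ (m.length : Int) ≤ r + dr ∨ ((m.headD []).length : Int) ≤ c + dc
          · exact searchA_zero _ _ _ _ _ _ (Or.inl (by rw [hlen, hhead]; exact hbb))
          · push_neg at hbb
            have hcb : pvCell m (r + dr) (c + dc) ≠ some p := by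
              rcases hfwd with h | h
              · exact absurd h (by push_neg; exact hbb)
              · exact h
            have hne : ¬ (r + dr = r ∧ c + dc = c) := fun ⟨h1, h2⟩ => hd ⟨by omega, by omega⟩
            have := pvCell_set_ne m r c (r + dr) (c + dc) "v" h0r h0c hbb.1 hbb.2.1 hne
            exact searchA_zero _ _ _ _ _ _ (Or.inr (by rw [this]; exact hcb))
        -- the backward child is the walk from one step behind
        have hmark : pvCell m' r c = some "v" := pvCell_set_self m r c "v" p h0r h0c hcell
        have hbz : searchDirectionA fuel m' (r - dr) (c - dc) p (dr, dc)
            = walkB fuel m m.length (m.headD []).length (r - dr) (c - dc) (-dr) (-dc) p := by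
          have hb' : pvCell m' (r - dr + dr) (c - dc + dc) ≠ some p := by
            have e1 : r - dr + dr = r := by ring
            have e2 : c - dc + dc = c := by ring
            rw [e1, e2, hmark]
            intro hh
            exact hp (by injection hh with hh; exact hh.symm)
          have := ih m' (r - dr) (c - dc) (Or.inr hb')
          rw [this, hlen, hhead, hm']
          exact walkB_set_behind fuel m (m.length) ((m.headD []).length) (r - dr) (c - dc) (-dr) (-dc) p "v"
            1 r c (by omega) (by push_cast; ring) (by push_cast; ring) h0r h0c
            (fun ⟨h1, h2⟩ => hd ⟨by omega, by omega⟩)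
        rw [hbz, hfz, walkB_succ, if_pos ⟨h0r, hrl, h0c, hcl, hcell⟩]
        ring
      · rw [searchA_zero _ _ _ _ _ _ (Or.inr hcell), walkB_succ,
           if_neg (fun hg => hcell hg.2.2.2.2)]

-- full run through a matching start cell: 1 + forward arm + backward arm
theorem searchA_through (fuel : Nat) (m : List (List String)) (r c dr dc : Int) (p : String)
    (hp : p ≠ "v") (hd : ¬ (dr = 0 ∧ dc = 0))
    (hin : ¬ (r < 0 ∨ c < 0 ∨ (m.length : Int) ≤ r ∨ ((m.headD []).length : Int) ≤ c))
    (hcell : pvCell m r c = some p) :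
    searchDirectionA (fuel + 1) m r c p (dr, dc)
      = 1 + walkB fuel m m.length (m.headD []).length (r + dr) (c + dc) dr dc p
          + walkB fuel m m.length (m.headD []).length (r - dr) (c - dc) (-dr) (-dc) p := by
  push_neg at hin
  obtain ⟨h0r, h0c, hrl, hcl⟩ := hin
  unfold searchDirectionA
  rw [if_neg (by push_neg; exact ⟨h0r, h0c, hrl, hcl⟩), if_neg (fun hh => hh hcell)]
  simp only []
  rw [if_neg (by norm_num)]
  set m' := pvSetCell m r c "v" with hm'
  have hlen : m'.length = m.length := length_pvSetCell m r c "v"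
  have hhead : (m'.headD []).length = (m.headD []).length := headD_length_pvSetCell m r c "v"
  have hmark : pvCell m' r c = some "v" := pvCell_set_self m r c "v" p h0r h0c hcell
  have hnotp : ¬ some "v" = some p := fun hh => hp (by injection hh with hh; exact hh.symm)
  have hfwd : searchDirectionA fuel m' (r + dr) (c + dc) p (dr, dc)
      = walkB fuel m m.length (m.headD []).length (r + dr) (c + dc) dr dc p := by
    have hb' : pvCell m' (r + dr - dr) (c + dc - dc) ≠ some p := by
      have e1 : r + dr - dr = r := by ring
      have e2 : c + dc - dc = c := by ring
      rw [e1, e2, hmark]; exact hnotp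
    rw [searchA_eq_walk_fwd fuel m' (r + dr) (c + dc) dr dc p hp hd (Or.inr hb'), hlen, hhead, hm']
    exact walkB_set_behind fuel m (m.length) ((m.headD []).length) (r + dr) (c + dc) dr dc p "v"
      1 r c (by omega) (by push_cast; ring) (by push_cast; ring) h0r h0c hd
  have hbwd : searchDirectionA fuel m' (r - dr) (c - dc) p (dr, dc)
      = walkB fuel m m.length (m.headD []).length (r - dr) (c - dc) (-dr) (-dc) p := by
    have hb' : pvCell m' (r - dr + dr) (c - dc + dc) ≠ some p := by
      have e1 : r - dr + dr = r := by ring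
      have e2 : c - dc + dc = c := by ring
      rw [e1, e2, hmark]; exact hnotp
    rw [searchA_eq_walk_bwd fuel m' (r - dr) (c - dc) dr dc p hp hd (Or.inr hb'), hlen, hhead, hm']
    exact walkB_set_behind fuel m (m.length) ((m.headD []).length) (r - dr) (c - dc) (-dr) (-dc) p "v"
      1 r c (by omega) (by push_cast; ring) (by push_cast; ring) h0r h0c
      (fun ⟨h1, h2⟩ => hd ⟨by omega, by omega⟩)
  rw [hfwd, hbwd]

-- walkB counts cells, so it is nonnegative
theorem walkB_nonneg (fuel : Nat) (m : List (List String)) (rows cols r c dr dc : Int)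
    (p : String) : 0 ≤ walkB fuel m rows cols r c dr dc p := by
  induction fuel generalizing r c with
  | zero => exact le_refl 0
  | succ fuel ih =>
    rw [walkB_succ]
    split
    · have := ih (r + dr) (c + dc); omega
    · exact le_refl 0

-- ===== VERDICT (by name: the statement is the Claim_ definition above) =====
theorem explore_if_four_connected_spec : Claim_equal_explore_if_four_connected := by
  intro matrix r c p hdom hpre
  unfold Spec_explore_if_four_connected
  by_cases hout : r < 0 ∨ c < 0 ∨ (matrix.length : Int) ≤ r ∨ ((matrix.headD []).length : Int) ≤ c
  · have hz : ∀ (fuel : Nat) (d : Int × Int), searchDirectionA fuel matrix r c p d = 0 :=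
      fun fuel d => searchA_zero _ _ _ _ _ _ (Or.inl hout)
    simp only [explore_if_four_connected, explore_if_four_connected_alt, List.foldl, hz]
    rw [if_pos (fun ⟨h1, h2, h3, h4⟩ => by rcases hout with h | h | h | h <;> omega)]
    norm_num
  · push_neg at hout
    obtain ⟨h0r, h0c, hrl, hcl⟩ := hout
    by_cases hcell : pvCell matrix r c = some p
    · have hp : p ≠ "v" := by
        rcases hpre with h | h | h
        · rcases h with h | h | h | h <;> omega
        · exact absurd hcell h.2
        · exact h.2
      have key : ∀ dr dc : Int, ¬ (dr = 0 ∧ dc = 0) →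
          searchDirectionA (matrix.length + (matrix.headD []).length + 5) matrix r c p (dr, dc)
            = 1 + walkB (matrix.length + (matrix.headD []).length + 4) matrix matrix.length
                    (matrix.headD []).length (r + dr) (c + dc) dr dc p
                + walkB (matrix.length + (matrix.headD []).length + 4) matrix matrix.length
                    (matrix.headD []).length (r - dr) (c - dc) (-dr) (-dc) p := by
        intro dr dc hd
        have e : matrix.length + (matrix.headD []).length + 5
            = (matrix.length + (matrix.headD []).length + 4) + 1 := by omega
        rw [e]
        exact searchA_through _ _ _ _ _ _ _ hp hd
          (by push_neg; exact ⟨h0r, h0c, hrl, hcl⟩) hcell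
      have d1 : dirCoordsA "up" = (-1, 0) := by decide
      have d2 : dirCoordsA "left" = (0, -1) := by decide
      have d3 : dirCoordsA "upleft" = (-1, -1) := by decide
      have d4 : dirCoordsA "upright" = (-1, 1) := by decide
      simp only [explore_if_four_connected, explore_if_four_connected_alt, List.foldl,
        List.any_cons, List.any_nil, d1, d2, d3, d4]

      rw [key (-1) 0 (by norm_num), key 0 (-1) (by norm_num), key (-1) (-1) (by norm_num),
          key (-1) 1 (by norm_num)]
      rw [if_neg (not_not_intro ⟨h0r, hrl, h0c, hcl⟩), if_neg (not_not_intro hcell)]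
      set FU := matrix.length + (matrix.headD []).length + 4 with hFU
      set L := (matrix.length : Int) with hL
      set C := ((matrix.headD []).length : Int) with hC
      set a1 := walkB FU matrix L C (r + -1) (c + 0) (-1) 0 p with ha1
      set a2 := walkB FU matrix L C (r - -1) (c - 0) (- -1) (-0) p with ha2
      set a3 := walkB FU matrix L C (r + 0) (c + -1) 0 (-1) p with ha3
      set a4 := walkB FU matrix L C (r - 0) (c - -1) (-0) (- -1) p with ha4
      set a5 := walkB FU matrix L C (r + -1) (c + -1) (-1) (-1) p with ha5
      set a6 := walkB FU matrix L C (r - -1) (c - -1) (- -1) (- -1) p with ha6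
      set a7 := walkB FU matrix L C (r + -1) (c + 1) (-1) 1 p with ha7
      set a8 := walkB FU matrix L C (r - -1) (c - 1) (- -1) (-1) p with ha8
      have n1 : 0 ≤ a1 := ha1 ▸ walkB_nonneg _ _ _ _ _ _ _ _ _
      have n2 : 0 ≤ a2 := ha2 ▸ walkB_nonneg _ _ _ _ _ _ _ _ _
      have n3 : 0 ≤ a3 := ha3 ▸ walkB_nonneg _ _ _ _ _ _ _ _ _
      have n4 : 0 ≤ a4 := ha4 ▸ walkB_nonneg _ _ _ _ _ _ _ _ _
      have n5 : 0 ≤ a5 := ha5 ▸ walkB_nonneg _ _ _ _ _ _ _ _ _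
      have n6 : 0 ≤ a6 := ha6 ▸ walkB_nonneg _ _ _ _ _ _ _ _ _
      have n7 : 0 ≤ a7 := ha7 ▸ walkB_nonneg _ _ _ _ _ _ _ _ _
      have n8 : 0 ≤ a8 := ha8 ▸ walkB_nonneg _ _ _ _ _ _ _ _ _
      rw [if_pos (show (0:Int) < 1 + a1 + a2 by omega),
          if_pos (show (0:Int) < 1 + a3 + a4 by omega),
          if_pos (show (0:Int) < 1 + a5 + a6 by omega),
          if_pos (show (0:Int) < 1 + a7 + a8 by omega)]
      by_cases hx1 : (4:Int) ≤ 1 + a1 + a2 <;>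
        by_cases hx2 : (4:Int) ≤ 1 + a3 + a4 <;>
          by_cases hx3 : (4:Int) ≤ 1 + a5 + a6 <;>
            by_cases hx4 : (4:Int) ≤ 1 + a7 + a8 <;>
              simp [hx1, hx2, hx3, hx4]
    · have hz : ∀ (fuel : Nat) (d : Int × Int), searchDirectionA fuel matrix r c p d = 0 :=
      fun fuel d => searchA_zero _ _ _ _ _ _ (Or.inr hcell)
      simp only [explore_if_four_connected, explore_if_four_connected_alt, List.foldl, hz]
      rw [if_neg (not_not_intro ⟨h0r, hrl, h0c, hcl⟩), if_pos hcell]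
      norm_num
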